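-- pv_equiv track=rewrite | github.com/meerceea01/MirceaD-Strava-Analyzer---Code-in-Place-2025 | md_strava_viz_final.py | separate_running_and_cycling
-- ===== SOURCE A (Python) =====
-- def separate_running_and_cycling(activities):
--     """
--     Split the activities into two lists: running and cycling. There's also a third list for other activities.
--     """
--     running_activities = []
--     cycling_activities = []
--     other_activities = []
--
--     for activity in activities:
--         activity_type = activity['type'].lower()
--
--         if 'run' in activity_type:
--             running_activities.append(activity)
--         elif any(word in activity_type for word in ['ride', 'cycling', 'bike']):
--             cycling_activities.append(activity)
--         else:
--             other_activities.append(activity)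
--
--     return running_activities, cycling_activities, other_activities
-- ===== SOURCE B (Python) =====
-- def separate_running_and_cycling(activities):
--     """
--     Split the activities into two lists: running and cycling. There's also a third list for other activities.
--     """
--     bike_words = ('ride', 'cycling', 'bike')
--     running_activities = [a for a in activities if 'run' in a['type'].lower()]
--     cycling_activities = [a for a in activities
--                           if 'run' not in a['type'].lower()
--                           and any(word in a['type'].lower() for word in bike_words)]
--     other_activities = [a for a in activities
--                         if 'run' not in a['type'].lower()
--                         and not any(word in a['type'].lower() for word in bike_words)]
--     return running_activities, cycling_activities, other_activities
-- ===== Notes on version B (the rewrite author's own statement) =====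
-- stated objective: alternative
-- what changed: Replaces the single classifying loop with three accumulators by three independent full-scan list comprehensions (run / not-run-and-bike-word / neither), each building one output list directly.
import Mathlib
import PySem

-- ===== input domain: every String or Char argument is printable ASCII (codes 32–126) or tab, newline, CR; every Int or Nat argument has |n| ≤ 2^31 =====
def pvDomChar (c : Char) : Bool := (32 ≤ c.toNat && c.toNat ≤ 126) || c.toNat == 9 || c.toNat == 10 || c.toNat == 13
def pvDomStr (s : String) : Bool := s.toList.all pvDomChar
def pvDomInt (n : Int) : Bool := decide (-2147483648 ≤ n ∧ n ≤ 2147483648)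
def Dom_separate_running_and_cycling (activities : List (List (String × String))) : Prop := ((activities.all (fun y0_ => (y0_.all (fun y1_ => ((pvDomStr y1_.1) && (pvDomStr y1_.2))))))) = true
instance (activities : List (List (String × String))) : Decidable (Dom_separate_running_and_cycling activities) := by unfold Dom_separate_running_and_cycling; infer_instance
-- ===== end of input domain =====

-- B replaces A's single classifying loop with three independent full-scan filters; objective: alternative decomposition (same cost).
-- activity['type'] : first-match lookup in the association list; Pre_ guarantees the key is present (Python raises KeyError otherwise).
def pvTypeOf (a : List (String × String)) : String :=
  (((a.find? (fun p => p.1 == "type")).map (·.2)).getD "")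

-- ===== PORT A =====
def separate_running_and_cycling (activities : List (List (String × String))) : (List (List (String × String))) × (List (List (String × String))) × (List (List (String × String))) :=
  activities.foldl
    (fun acc activity =>
      let activity_type := PySem.Str.lower (pvTypeOf activity)
      if PySem.Str.isIn "run" activity_type then
        (acc.1 ++ [activity], acc.2.1, acc.2.2)
      else if (["ride", "cycling", "bike"].any (fun word => PySem.Str.isIn word activity_type)) then
        (acc.1, acc.2.1 ++ [activity], acc.2.2)
      else
        (acc.1, acc.2.1, acc.2.2 ++ [activity]))
    ([], [], [])

-- ===== PORT B =====
def pvIsRun (a : List (String × String)) : Bool :=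
  PySem.Str.isIn "run" (PySem.Str.lower (pvTypeOf a))

def pvIsBike (a : List (String × String)) : Bool :=
  ["ride", "cycling", "bike"].any (fun word => PySem.Str.isIn word (PySem.Str.lower (pvTypeOf a)))

def separate_running_and_cycling_alt (activities : List (List (String × String))) : (List (List (String × String))) × (List (List (String × String))) × (List (List (String × String))) :=
  (activities.filter (fun a => pvIsRun a),
   activities.filter (fun a => !pvIsRun a && pvIsBike a),
   activities.filter (fun a => !pvIsRun a && !pvIsBike a))

-- ===== PRECONDITION & SPEC =====
-- Pre_ excludes inputs where some activity lacks the key "type": there the Python A raises KeyError.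
def Pre_separate_running_and_cycling (activities : List (List (String × String))) : Prop :=
  (activities.all (fun a => (a.find? (fun p => p.1 == "type")).isSome)) = true
instance (activities : List (List (String × String))) : Decidable (Pre_separate_running_and_cycling activities) := by unfold Pre_separate_running_and_cycling; infer_instance
def pvWitness_separate_running_and_cycling : (List (List (String × String))) := [[("type", "Run")], [("type", "Ride")], [("type", "Swim")]]

def Spec_separate_running_and_cycling (activities : List (List (String × String))) (out : (List (List (String × String))) × (List (List (String × String))) × (List (List (String × String)))) : Prop := out = separate_running_and_cycling_alt activities
instance (activities : List (List (String × String))) (out : (List (List (String × String))) × (List (List (String × String))) × (List (List (String × String)))) : Decidable (Spec_separate_running_and_cycling activities out) := by unfold Spec_separate_running_and_cycling; infer_instance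

-- ===== CLAIM (what is proved, stated in full; the proofs are below) =====
def Claim_equal_separate_running_and_cycling : Prop := ∀ (activities : List (List (String × String))), Dom_separate_running_and_cycling activities → Pre_separate_running_and_cycling activities → Spec_separate_running_and_cycling activities (separate_running_and_cycling activities)

-- ===== LEMMAS AND PROOFS =====
-- Loop invariant for A's fold: starting from accumulators (r, c, o) it appends the three filters.
-- (The step function below is definitionally A's loop body: pvIsRun/pvIsBike unfold to its tests.)
theorem pvFold_eq_filters (xs : List (List (String × String)))
    (r c o : List (List (String × String))) :
    xs.foldl
      (fun acc activity =>
        if pvIsRun activity then (acc.1 ++ [activity], acc.2.1, acc.2.2)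
        else if pvIsBike activity then (acc.1, acc.2.1 ++ [activity], acc.2.2)
        else (acc.1, acc.2.1, acc.2.2 ++ [activity]))
      (r, c, o)
    = (r ++ xs.filter (fun a => pvIsRun a),
       c ++ xs.filter (fun a => !pvIsRun a && pvIsBike a),
       o ++ xs.filter (fun a => !pvIsRun a && !pvIsBike a)) := by
  induction xs generalizing r c o with
  | nil => simp
  | cons x xs ih =>
    simp only [List.foldl_cons, List.filter_cons]
    by_cases hr : pvIsRun x
    · simp only [hr, if_true, Bool.not_true, Bool.false_and, Bool.true_eq, decide_true,
        Bool.false_eq_true, decide_false, ih]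
      simp
    · by_cases hb : pvIsBike x
      · simp only [hr, hb, if_true, Bool.not_false, Bool.true_and, ih]
        simp
      · simp only [hr, hb, ih]
        simp

-- ===== VERDICT (by name: the statement is the Claim_ definition above) =====
theorem separate_running_and_cycling_spec : Claim_equal_separate_running_and_cycling := by
  intro activities _ _
  show separate_running_and_cycling activities = separate_running_and_cycling_alt activities
  have h := pvFold_eq_filters activities [] [] []
  simp only [List.nil_append] at h
  exact h
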